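-- pv_equiv track=rewrite | github.com/Yuvv/LeetCode | 1201-1300/1287-element-appearing-more-than-25-in-sorted-array.py | get_range_len
-- ===== SOURCE A (Python) =====
-- from typing import List
--
-- def get_range_len(arr: List[int], bi, i, ei):
--     """
--     get end point
--     """
--     # get real bi
--     tmp = i
--     while arr[bi] < arr[i]:
--         m = (bi + tmp) // 2
--         if m > 0 and arr[m] == arr[i] and arr[m - 1] < arr[i]:
--             bi = m
--             break
--         if arr[m] == arr[i]:
--             tmp = m - 1
--         elif arr[m] < arr[i]:
--             bi = m + 1
--
--     # get real ei
--     tmp = i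
--     while arr[i] < arr[ei]:
--         m = (ei + tmp) // 2
--         if m < ei and arr[m] == arr[i] and arr[m + 1] > arr[i]:
--             ei = m
--             break
--         if arr[m] == arr[i]:
--             tmp = m + 1
--         elif arr[m] > arr[i]:
--             ei = m - 1
--
--     return ei - bi + 1
-- ===== SOURCE B (Python) =====
-- from typing import List
--
-- def get_range_len(arr: List[int], bi, i, ei):
--     """Length of the run of arr[i] inside [bi, ei], by linear expansion."""
--     v = arr[i]
--     left = bi
--     if arr[bi] < v:
--         # the run starts strictly after bi: walk down until the value changes
--         left = i
--         while arr[left - 1] == v: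
--             left -= 1
--     right = ei
--     if v < arr[ei]:
--         right = i
--         while arr[right + 1] == v:
--             right += 1
--     return right - left + 1
-- ===== Notes on version B (the rewrite author's own statement) =====
-- stated objective: simpler
-- what changed: Replaces the two hand-rolled binary searches for the run boundaries by two linear walks expanding from i, keeping the same boundary tests (arr[bi] < arr[i] / arr[i] < arr[ei]) that decide whether a boundary needs moving at all.
-- outside the precondition, e.g. on get_range_len([2, 1, 2, 1, -3], 4, 0, -5): A returns -6, B returns -4; on get_range_len([4, 5, -3], 0, 2, -2): A returns 0, B raises IndexError
import Mathlib
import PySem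

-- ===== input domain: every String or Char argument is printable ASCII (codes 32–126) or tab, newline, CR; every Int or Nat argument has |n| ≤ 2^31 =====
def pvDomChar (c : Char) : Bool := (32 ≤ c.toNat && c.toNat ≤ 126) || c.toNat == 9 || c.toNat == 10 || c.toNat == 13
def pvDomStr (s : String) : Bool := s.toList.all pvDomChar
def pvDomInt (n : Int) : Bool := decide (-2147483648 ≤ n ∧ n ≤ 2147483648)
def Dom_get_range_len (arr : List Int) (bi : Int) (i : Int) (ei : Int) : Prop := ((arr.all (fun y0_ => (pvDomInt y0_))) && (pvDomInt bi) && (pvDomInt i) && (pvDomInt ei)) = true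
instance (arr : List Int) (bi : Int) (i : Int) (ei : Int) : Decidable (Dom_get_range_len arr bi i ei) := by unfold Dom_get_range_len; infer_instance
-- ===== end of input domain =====

-- B replaces A's two hand-rolled binary searches by two linear walks from i (simpler); equivalence proved on Pre_ below.

-- arr[k] as Python reads it (pyGet?: negative k counts from the end); Pre_ keeps every access in range, 0 is a dummy outside
def pvIdx (arr : List Int) (k : Int) : Int := (PySem.List.pyGet? arr k).getD 0

-- ===== PORT A =====
-- first while loop of A ("get real bi"); fuel makes the recursion total, Pre_ guarantees it suffices
def pvLoopBi (arr : List Int) : Nat → Int → Int → Int → Int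
  | 0, bi, _, _ => bi
  | fuel + 1, bi, tmp, i =>
    if pvIdx arr bi < pvIdx arr i then
      let m := PySem.Int.floordiv (bi + tmp) 2
      if 0 < m ∧ pvIdx arr m = pvIdx arr i ∧ pvIdx arr (m - 1) < pvIdx arr i then m
      else if pvIdx arr m = pvIdx arr i then pvLoopBi arr fuel bi (m - 1) i
      else if pvIdx arr m < pvIdx arr i then pvLoopBi arr fuel (m + 1) tmp i
      else pvLoopBi arr fuel bi tmp i
    else bi

-- second while loop of A ("get real ei")
def pvLoopEi (arr : List Int) : Nat → Int → Int → Int → Int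
  | 0, ei, _, _ => ei
  | fuel + 1, ei, tmp, i =>
    if pvIdx arr i < pvIdx arr ei then
      let m := PySem.Int.floordiv (ei + tmp) 2
      if m < ei ∧ pvIdx arr m = pvIdx arr i ∧ pvIdx arr i < pvIdx arr (m + 1) then m
      else if pvIdx arr m = pvIdx arr i then pvLoopEi arr fuel ei (m + 1) i
      else if pvIdx arr i < pvIdx arr m then pvLoopEi arr fuel (m - 1) tmp i
      else pvLoopEi arr fuel ei tmp i
    else ei

def get_range_len (arr : List Int) (bi : Int) (i : Int) (ei : Int) : Int :=
  pvLoopEi arr (2 * arr.length + 64) ei i i - pvLoopBi arr (2 * arr.length + 64) bi i i + 1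

-- ===== PORT B =====
-- walk left while arr[left-1] == v
def pvWalkL (arr : List Int) (v : Int) : Nat → Int → Int
  | 0, left => left
  | fuel + 1, left =>
    if pvIdx arr (left - 1) = v then pvWalkL arr v fuel (left - 1) else left

-- walk right while arr[right+1] == v
def pvWalkR (arr : List Int) (v : Int) : Nat → Int → Int
  | 0, right => right
  | fuel + 1, right =>
    if pvIdx arr (right + 1) = v then pvWalkR arr v fuel (right + 1) else right

def get_range_len_alt (arr : List Int) (bi : Int) (i : Int) (ei : Int) : Int :=
  (if pvIdx arr i < pvIdx arr ei then pvWalkR arr (pvIdx arr i) (2 * arr.length + 64) i else ei)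
  - (if pvIdx arr bi < pvIdx arr i then pvWalkL arr (pvIdx arr i) (2 * arr.length + 64) i else bi) + 1

-- ===== PRECONDITION & SPEC =====
-- Pre_ requires the three indices to be valid Python indices and, on each side on which the program
-- moves a boundary (arr[bi] < arr[i] / arr[i] < arr[ei]), properly ordered bounds with that part of
-- the array sorted non-decreasingly: both programs assume a sorted array (the LeetCode caller
-- guarantees it); on unsorted or misordered input the function is unspecified: A's binary searches
-- may loop forever or the two programs may legitimately return different values, and B may raise
-- IndexError there (see cites).
def Pre_get_range_len (arr : List Int) (bi : Int) (i : Int) (ei : Int) : Prop :=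
  PySem.Raise.InRange arr.length bi ∧ PySem.Raise.InRange arr.length i ∧
  PySem.Raise.InRange arr.length ei ∧
  (¬ pvIdx arr bi < pvIdx arr i ∨
    (0 ≤ bi ∧ bi ≤ i ∧ List.Pairwise (· ≤ ·) ((arr.drop bi.toNat).take (i - bi + 1).toNat))) ∧
  (¬ pvIdx arr i < pvIdx arr ei ∨
    (0 ≤ i ∧ i ≤ ei ∧ List.Pairwise (· ≤ ·) ((arr.drop i.toNat).take (ei - i + 1).toNat)))
instance (arr : List Int) (bi : Int) (i : Int) (ei : Int) : Decidable (Pre_get_range_len arr bi i ei) := by unfold Pre_get_range_len; infer_instance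

def pvWitness_get_range_len : List Int × Int × Int × Int := ([1, 2, 2, 2, 3], 0, 2, 4)

def Spec_get_range_len (arr : List Int) (bi : Int) (i : Int) (ei : Int) (out : Int) : Prop := out = get_range_len_alt arr bi i ei
instance (arr : List Int) (bi : Int) (i : Int) (ei : Int) (out : Int) : Decidable (Spec_get_range_len arr bi i ei out) := by unfold Spec_get_range_len; infer_instance

-- ===== CLAIM (what is proved, stated in full; the proofs are below) =====
def Claim_equal_get_range_len : Prop := ∀ (arr : List Int) (bi : Int) (i : Int) (ei : Int), Dom_get_range_len arr bi i ei → Pre_get_range_len arr bi i ei → Spec_get_range_len arr bi i ei (get_range_len arr bi i ei)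

-- ===== LEMMAS AND PROOFS =====

theorem pvIdx_eq_getElem (arr : List Int) (k : Int) (h0 : 0 ≤ k) (hk : k < (arr.length : Int)) :
    pvIdx arr k = arr[k.toNat]'(by omega) := by
  unfold pvIdx
  rw [PySem.List.pyGet?_eq_some_getElem arr h0 hk]
  rfl

-- monotonicity of pvIdx on a sorted segment [lo, hi] of arr
theorem pvMonoSeg (arr : List Int) (lo hi : Int)
    (hs : List.Pairwise (· ≤ ·) ((arr.drop lo.toNat).take (hi - lo + 1).toNat))
    (hlo : 0 ≤ lo) (hh : hi < (arr.length : Int)) :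
    ∀ a b : Int, lo ≤ a → a ≤ b → b ≤ hi → pvIdx arr a ≤ pvIdx arr b := by
  intro a b hla hab hbh
  rcases eq_or_lt_of_le hab with h | h
  · subst h; exact le_refl _
  · rw [pvIdx_eq_getElem arr a (by omega) (by omega),
        pvIdx_eq_getElem arr b (by omega) (by omega)]
    have hlen : ((arr.drop lo.toNat).take (hi - lo + 1).toNat).length
        = min (hi - lo + 1).toNat (arr.length - lo.toNat) := by
      simp [List.length_take, List.length_drop]
    have hia : (a.toNat - lo.toNat) < ((arr.drop lo.toNat).take (hi - lo + 1).toNat).length := by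
      rw [hlen]; omega
    have hib : (b.toNat - lo.toNat) < ((arr.drop lo.toNat).take (hi - lo + 1).toNat).length := by
      rw [hlen]; omega
    have hkey := List.pairwise_iff_getElem.mp hs (a.toNat - lo.toNat) (b.toNat - lo.toNat)
      hia hib (by omega)
    simp only [List.getElem_take, List.getElem_drop] at hkey
    have ha' : lo.toNat + (a.toNat - lo.toNat) = a.toNat := by omega
    have hb' : lo.toNat + (b.toNat - lo.toNat) = b.toNat := by omega
    simp only [ha', hb'] at hkey
    exact hkey

-- leftmost index of the run of arr[i] inside [bi0, i], when arr[bi0] < arr[i]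
theorem pvExistsL (arr : List Int) (bi0 i : Int)
    (hmono : ∀ a b : Int, bi0 ≤ a → a ≤ b → b ≤ i → pvIdx arr a ≤ pvIdx arr b)
    (hbii : bi0 ≤ i) (hcond : pvIdx arr bi0 < pvIdx arr i) :
    ∃ l : Int, bi0 < l ∧ l ≤ i ∧ pvIdx arr l = pvIdx arr i ∧
      pvIdx arr (l - 1) < pvIdx arr i := by
  have hbilt : bi0 < i := by
    rcases eq_or_lt_of_le hbii with h | h
    · rw [h] at hcond; exact absurd hcond (lt_irrefl _)
    · exact h
  have aux : ∀ (k : Nat) (j : Int), bi0 < j → j ≤ i → pvIdx arr j = pvIdx arr i →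
      (j - bi0).toNat ≤ k →
      ∃ l : Int, bi0 < l ∧ l ≤ j ∧ pvIdx arr l = pvIdx arr i ∧
        pvIdx arr (l - 1) ≠ pvIdx arr i := by
    intro k
    induction k with
    | zero => intro j hb hj hv hk; exfalso; omega
    | succ k ih =>
      intro j hb hj hv hk
      by_cases hprev : pvIdx arr (j - 1) = pvIdx arr i
      · by_cases hjb : bi0 < j - 1
        · obtain ⟨l, a, b, c, d⟩ := ih (j - 1) hjb (by omega) hprev (by omega)
          exact ⟨l, a, by omega, c, d⟩
        · exfalso
          have : j - 1 = bi0 := by omega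
          rw [this] at hprev
          rw [hprev] at hcond
          exact absurd hcond (lt_irrefl _)
      · exact ⟨j, hb, le_refl _, hv, hprev⟩
  obtain ⟨l, a, b, c, d⟩ := aux (i - bi0).toNat i hbilt (le_refl _) rfl (le_refl _)
  refine ⟨l, a, b, c, lt_of_le_of_ne ?_ d⟩
  have := hmono (l - 1) l (by omega) (by omega) (by omega)
  rw [c] at this
  exact this

-- rightmost index of the run of arr[i] inside [i, ei0], when arr[i] < arr[ei0]
theorem pvExistsR (arr : List Int) (i ei0 : Int)
    (hmono : ∀ a b : Int, i ≤ a → a ≤ b → b ≤ ei0 → pvIdx arr a ≤ pvIdx arr b)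
    (hiei : i ≤ ei0) (hcond : pvIdx arr i < pvIdx arr ei0) :
    ∃ r : Int, i ≤ r ∧ r < ei0 ∧ pvIdx arr r = pvIdx arr i ∧
      pvIdx arr i < pvIdx arr (r + 1) := by
  have heilt : i < ei0 := by
    rcases eq_or_lt_of_le hiei with h | h
    · rw [← h] at hcond; exact absurd hcond (lt_irrefl _)
    · exact h
  have aux : ∀ (k : Nat) (j : Int), i ≤ j → j < ei0 → pvIdx arr j = pvIdx arr i →
      (ei0 - j).toNat ≤ k →
      ∃ r : Int, j ≤ r ∧ r < ei0 ∧ pvIdx arr r = pvIdx arr i ∧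
        pvIdx arr (r + 1) ≠ pvIdx arr i := by
    intro k
    induction k with
    | zero => intro j hb hj hv hk; exfalso; omega
    | succ k ih =>
      intro j hb hj hv hk
      by_cases hnext : pvIdx arr (j + 1) = pvIdx arr i
      · by_cases hje : j + 1 < ei0
        · obtain ⟨r, a, b, c, d⟩ := ih (j + 1) (by omega) hje hnext (by omega)
          exact ⟨r, by omega, b, c, d⟩
        · exfalso
          have : j + 1 = ei0 := by omega
          rw [this] at hnext
          rw [hnext] at hcond
          exact absurd hcond (lt_irrefl _)
      · exact ⟨j, le_refl _, hj, hv, hnext⟩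
  obtain ⟨r, a, b, c, d⟩ := aux (ei0 - i).toNat i (le_refl _) heilt rfl (le_refl _)
  refine ⟨r, a, b, c, ?_⟩
  have hle : pvIdx arr i ≤ pvIdx arr (r + 1) := by
    have := hmono r (r + 1) a (by omega) (by omega)
    rw [c] at this
    exact this
  exact lt_of_le_of_ne hle (fun h => d h.symm)

theorem pvLoopBi_eq (arr : List Int) (bi0 i l : Int)
    (hmono : ∀ a b : Int, bi0 ≤ a → a ≤ b → b ≤ i → pvIdx arr a ≤ pvIdx arr b)
    (hbi0 : 0 ≤ bi0)
    (hl0 : bi0 < l) (hli : l ≤ i) (hlv : pvIdx arr l = pvIdx arr i)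
    (hl1 : pvIdx arr (l - 1) < pvIdx arr i) :
    ∀ (fuel : Nat) (bi tmp : Int), (tmp - bi).toNat < fuel →
      bi0 ≤ bi → bi ≤ l → l ≤ tmp → tmp ≤ i →
      pvLoopBi arr fuel bi tmp i = l := by
  intro fuel
  induction fuel with
  | zero => intro bi tmp hf; omega
  | succ fuel ih =>
    intro bi tmp hf hbib hbil hltmp htmpi
    rcases eq_or_lt_of_le hbil with hbl | hbl
    · subst hbl
      simp only [pvLoopBi]
      rw [if_neg (by rw [hlv]; exact lt_irrefl _)]
    · have hcond : pvIdx arr bi < pvIdx arr i :=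
        lt_of_le_of_lt (hmono bi (l - 1) hbib (by omega) (by omega)) hl1
      simp only [pvLoopBi]
      rw [if_pos hcond]
      have hm := PySem.Int.floordiv_two_mid_bounds (show bi ≤ tmp by omega)
      set m := PySem.Int.floordiv (bi + tmp) 2 with hmdef
      rcases lt_trichotomy m l with hml | hml | hml
      · have hvm : pvIdx arr m < pvIdx arr i :=
          lt_of_le_of_lt (hmono m (l - 1) (by omega) (by omega) (by omega)) hl1
        rw [if_neg (by intro h; exact absurd h.2.1 (ne_of_lt hvm)),
            if_neg (ne_of_lt hvm), if_pos hvm]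
        exact ih (m + 1) tmp (by omega) (by omega) (by omega) hltmp htmpi
      · subst hml
        rw [if_pos ⟨by omega, hlv, hl1⟩]
      · have hvm : pvIdx arr m = pvIdx arr i :=
          le_antisymm (hmono m i (by omega) (by omega) (by omega))
            (hlv ▸ hmono l m (by omega) (by omega) (by omega))
        have hvm1 : pvIdx arr (m - 1) = pvIdx arr i :=
          le_antisymm (hmono (m - 1) i (by omega) (by omega) (by omega))
            (hlv ▸ hmono l (m - 1) (by omega) (by omega) (by omega))
        rw [if_neg (by intro h; exact absurd h.2.2 (by rw [hvm1]; exact lt_irrefl _)),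
            if_pos hvm]
        exact ih bi (m - 1) (by omega) hbib hbil (by omega) (by omega)

theorem pvLoopEi_eq (arr : List Int) (i ei0 r : Int)
    (hmono : ∀ a b : Int, i ≤ a → a ≤ b → b ≤ ei0 → pvIdx arr a ≤ pvIdx arr b)
    (hri : i ≤ r) (hre : r < ei0) (hrv : pvIdx arr r = pvIdx arr i)
    (hr1 : pvIdx arr i < pvIdx arr (r + 1)) :
    ∀ (fuel : Nat) (ei tmp : Int), (ei - tmp).toNat < fuel →
      ei ≤ ei0 → r ≤ ei → tmp ≤ r → i ≤ tmp →
      pvLoopEi arr fuel ei tmp i = r := by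
  intro fuel
  induction fuel with
  | zero => intro ei tmp hf; omega
  | succ fuel ih =>
    intro ei tmp hf heie hrei htmpr hitmp
    rcases eq_or_lt_of_le hrei with hre' | hre'
    · subst hre'
      simp only [pvLoopEi]
      rw [if_neg (by rw [hrv]; exact lt_irrefl _)]
    · have hcond : pvIdx arr i < pvIdx arr ei :=
        lt_of_lt_of_le hr1 (hmono (r + 1) ei (by omega) (by omega) (by omega))
      simp only [pvLoopEi]
      rw [if_pos hcond]
      have hm := PySem.Int.floordiv_two_mid_bounds (show tmp ≤ ei by omega)
      have hmdef : PySem.Int.floordiv (ei + tmp) 2 = PySem.Int.floordiv (tmp + ei) 2 := by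
        ring_nf
      rw [hmdef]
      set m := PySem.Int.floordiv (tmp + ei) 2 with hmd
      rcases lt_trichotomy m r with hmr | hmr | hmr
      · have hvm : pvIdx arr m = pvIdx arr i :=
          le_antisymm (hrv ▸ hmono m r (by omega) (by omega) (by omega))
            (hmono i m (le_refl _) (by omega) (by omega))
        have hvm1 : pvIdx arr (m + 1) = pvIdx arr i :=
          le_antisymm (hrv ▸ hmono (m + 1) r (by omega) (by omega) (by omega))
            (hmono i (m + 1) (le_refl _) (by omega) (by omega))
        rw [if_neg (by intro h; exact absurd h.2.2 (by rw [hvm1]; exact lt_irrefl _)),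
            if_pos hvm]
        exact ih ei (m + 1) (by omega) heie hrei (by omega) (by omega)
      · subst hmr
        rw [if_pos ⟨by omega, hrv, hr1⟩]
      · have hvm : pvIdx arr i < pvIdx arr m :=
          lt_of_lt_of_le hr1 (hmono (r + 1) m (by omega) (by omega) (by omega))
        rw [if_neg (by intro h; exact absurd h.2.1 (ne_of_gt hvm)),
            if_neg (ne_of_gt hvm), if_pos hvm]
        exact ih (m - 1) tmp (by omega) (by omega) (by omega) htmpr hitmp

theorem pvWalkL_eq (arr : List Int) (bi0 i l : Int)
    (hmono : ∀ a b : Int, bi0 ≤ a → a ≤ b → b ≤ i → pvIdx arr a ≤ pvIdx arr b)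
    (hl0 : bi0 < l) (hli : l ≤ i) (hlv : pvIdx arr l = pvIdx arr i)
    (hl1 : pvIdx arr (l - 1) < pvIdx arr i) :
    ∀ (fuel : Nat) (left : Int), (left - bi0).toNat < fuel →
      l ≤ left → left ≤ i →
      pvWalkL arr (pvIdx arr i) fuel left = l := by
  intro fuel
  induction fuel with
  | zero => intro left hf hl hr; exfalso; omega
  | succ fuel ih =>
    intro left hf hlleft hlefti
    simp only [pvWalkL]
    rcases eq_or_lt_of_le hlleft with h | h
    · subst h
      rw [if_neg (ne_of_lt hl1)]
    · have hv : pvIdx arr (left - 1) = pvIdx arr i :=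
        le_antisymm (hmono (left - 1) i (by omega) (by omega) (by omega))
          (hlv ▸ hmono l (left - 1) (by omega) (by omega) (by omega))
      rw [if_pos hv]
      exact ih (left - 1) (by omega) (by omega) (by omega)

theorem pvWalkR_eq (arr : List Int) (i ei0 r : Int)
    (hmono : ∀ a b : Int, i ≤ a → a ≤ b → b ≤ ei0 → pvIdx arr a ≤ pvIdx arr b)
    (hri : i ≤ r) (hre : r < ei0) (hrv : pvIdx arr r = pvIdx arr i)
    (hr1 : pvIdx arr i < pvIdx arr (r + 1)) :
    ∀ (fuel : Nat) (right : Int), (ei0 - right).toNat < fuel →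
      i ≤ right → right ≤ r →
      pvWalkR arr (pvIdx arr i) fuel right = r := by
  intro fuel
  induction fuel with
  | zero => intro right hf hl hr; exfalso; omega
  | succ fuel ih =>
    intro right hf hiright hrightr
    simp only [pvWalkR]
    rcases eq_or_lt_of_le hrightr with h | h
    · subst h
      rw [if_neg (ne_of_gt hr1)]
    · have hv : pvIdx arr (right + 1) = pvIdx arr i :=
        le_antisymm (hrv ▸ hmono (right + 1) r (by omega) (by omega) (by omega))
          (hmono i (right + 1) (le_refl _) (by omega) (by omega))
      rw [if_pos hv]
      exact ih (right + 1) (by omega) (by omega) (by omega)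

theorem pvLoopBi_stop (arr : List Int) (fuel : Nat) (bi tmp i : Int)
    (h : ¬ pvIdx arr bi < pvIdx arr i) : pvLoopBi arr (fuel + 1) bi tmp i = bi := by
  simp only [pvLoopBi]
  rw [if_neg h]

theorem pvLoopEi_stop (arr : List Int) (fuel : Nat) (ei tmp i : Int)
    (h : ¬ pvIdx arr i < pvIdx arr ei) : pvLoopEi arr (fuel + 1) ei tmp i = ei := by
  simp only [pvLoopEi]
  rw [if_neg h]

-- ===== VERDICT (by name: the statement is the Claim_ definition above) =====
theorem get_range_len_spec : Claim_equal_get_range_len := by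
  intro arr bi i ei _ hpre
  obtain ⟨hbR, hiR, heR, hLok, hRok⟩ := hpre
  obtain ⟨hbR1, hbR2⟩ := hbR
  obtain ⟨hiR1, hiR2⟩ := hiR
  obtain ⟨heR1, heR2⟩ := heR
  have hfs : (2 * arr.length + 64) = (2 * arr.length + 63) + 1 := by omega
  have hLeq : pvLoopBi arr (2 * arr.length + 64) bi i i
      = (if pvIdx arr bi < pvIdx arr i then pvWalkL arr (pvIdx arr i) (2 * arr.length + 64) i else bi) := by
    by_cases hc1 : pvIdx arr bi < pvIdx arr i
    · rw [if_pos hc1]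
      rcases hLok with h | ⟨hb0, hbii, hseg⟩
      · exact absurd hc1 h
      · have hmono := pvMonoSeg arr bi i hseg hb0 hiR2
        obtain ⟨l, hl0, hli, hlv, hl1⟩ := pvExistsL arr bi i hmono hbii hc1
        rw [pvLoopBi_eq arr bi i l hmono hb0 hl0 hli hlv hl1 _ bi i (by omega) le_rfl
              (by omega) hli le_rfl,
            pvWalkL_eq arr bi i l hmono hl0 hli hlv hl1 _ i (by omega) hli le_rfl]
    · rw [if_neg hc1, hfs, pvLoopBi_stop arr _ _ _ _ hc1]
  have hReq : pvLoopEi arr (2 * arr.length + 64) ei i i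
      = (if pvIdx arr i < pvIdx arr ei then pvWalkR arr (pvIdx arr i) (2 * arr.length + 64) i else ei) := by
    by_cases hc2 : pvIdx arr i < pvIdx arr ei
    · rw [if_pos hc2]
      rcases hRok with h | ⟨hi0, hiei, hseg⟩
      · exact absurd hc2 h
      · have hmono := pvMonoSeg arr i ei hseg hi0 heR2
        obtain ⟨r, hri, hre, hrv, hr1⟩ := pvExistsR arr i ei hmono hiei hc2
        rw [pvLoopEi_eq arr i ei r hmono hri hre hrv hr1 _ ei i (by omega) le_rfl
              (by omega) hri le_rfl,
            pvWalkR_eq arr i ei r hmono hri hre hrv hr1 _ i (by omega) le_rfl hri]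
    · rw [if_neg hc2, hfs, pvLoopEi_stop arr _ _ _ _ hc2]
  show _ = _
  unfold get_range_len get_range_len_alt
  rw [hLeq, hReq]
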